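-- pv_equiv track=rewrite | github.com/Sunshine535/nips-clox | code/router_n150.py | assign_best
-- ===== SOURCE A (Python) =====
-- STRATEGIES = ["standard_cot", "self_consistency", "backward_cloze"]
--
-- def assign_best(labels):
--     correct = [s for s in STRATEGIES if labels[s]]
--     if not correct:
--         return "self_consistency"  # fallback: use SC by default
--     if len(correct) == 3:
--         return "standard_cot"  # cheapest when all agree
--     # Prefer cheaper correct
--     cost = {"standard_cot": 1, "backward_cloze": 4, "self_consistency": 8}
--     return min(correct, key=lambda s: cost[s])
-- ===== SOURCE B (Python) =====
-- STRATEGIES = ["standard_cot", "self_consistency", "backward_cloze"]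
-- _PRIORITY = ["standard_cot", "backward_cloze", "self_consistency"]
--
-- def assign_best(labels):
--     # evaluate all three keys up front (same KeyError behaviour as A)
--     ok = {s: bool(labels[s]) for s in STRATEGIES}
--     for s in _PRIORITY:
--         if ok[s]:
--             return s
--     return "self_consistency"
-- ===== Notes on version B (the rewrite author's own statement) =====
-- stated objective: simpler
-- what changed: Replaces the filter-then-min-over-a-cost-dict two-pass (plus the redundant len==3 branch) by a single short-circuit scan of a hardcoded cost-priority list.
import Mathlib
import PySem

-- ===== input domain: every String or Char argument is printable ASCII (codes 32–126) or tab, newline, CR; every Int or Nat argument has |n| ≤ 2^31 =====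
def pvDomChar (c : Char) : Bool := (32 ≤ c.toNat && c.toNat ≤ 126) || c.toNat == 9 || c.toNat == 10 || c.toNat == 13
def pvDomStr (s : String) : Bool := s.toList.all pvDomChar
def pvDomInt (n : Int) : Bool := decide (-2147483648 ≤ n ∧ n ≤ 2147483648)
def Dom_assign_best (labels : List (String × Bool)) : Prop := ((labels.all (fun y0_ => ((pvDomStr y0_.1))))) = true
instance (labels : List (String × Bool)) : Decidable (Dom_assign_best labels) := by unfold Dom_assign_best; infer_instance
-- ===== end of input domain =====

-- B replaces A's filter + min-over-a-cost-dict (and the redundant len==3 branch) by a single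
-- priority-ordered short-circuit scan; objective: simpler.


-- ===== PORT A =====
def pySTRATEGIES : List String := ["standard_cot", "self_consistency", "backward_cloze"]

def assign_best (labels : List (String × Bool)) : String :=
  let d := PySem.Dict.mk labels
  let correct := pySTRATEGIES.filter (fun s => (d.get? s).getD false)
  if correct = [] then "self_consistency"
  else if correct.length = 3 then "standard_cot"
  else
    let cost : PySem.Dict String Int :=
      PySem.Dict.mk [("standard_cot", 1), ("backward_cloze", 4), ("self_consistency", 8)]
    (PySem.List.min? correct (fun s => (cost.get? s).getD 0)).getD "self_consistency"

-- ===== PORT B =====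
def pyPRIORITY : List String := ["standard_cot", "backward_cloze", "self_consistency"]

def assign_best_alt (labels : List (String × Bool)) : String :=
  let d := PySem.Dict.mk labels
  let ok := pySTRATEGIES.foldl (fun acc s => acc.insert s ((d.get? s).getD false)) PySem.Dict.empty
  match pyPRIORITY.find? (fun s => (ok.get? s).getD false) with
  | some s => s
  | none => "self_consistency"

-- ===== PRECONDITION & SPEC =====
-- Pre_ excludes inputs missing any of the three strategy keys, on which Python A raises KeyError.
def Pre_assign_best (labels : List (String × Bool)) : Prop :=
  "standard_cot" ∈ labels.map Prod.fst ∧ "self_consistency" ∈ labels.map Prod.fst ∧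
    "backward_cloze" ∈ labels.map Prod.fst
instance (labels : List (String × Bool)) : Decidable (Pre_assign_best labels) := by
  unfold Pre_assign_best; infer_instance
def pvWitness_assign_best : (List (String × Bool)) :=
  [("standard_cot", false), ("self_consistency", true), ("backward_cloze", true)]
def Spec_assign_best (labels : List (String × Bool)) (out : String) : Prop := out = assign_best_alt labels
instance (labels : List (String × Bool)) (out : String) : Decidable (Spec_assign_best labels out) := by unfold Spec_assign_best; infer_instance

-- ===== CLAIM (what is proved, stated in full; the proofs are below) =====
def Claim_equal_assign_best : Prop := ∀ (labels : List (String × Bool)), Dom_assign_best labels → Pre_assign_best labels → Spec_assign_best labels (assign_best labels)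

-- ===== LEMMAS AND PROOFS =====

-- ===== VERDICT (by name: the statement is the Claim_ definition above) =====
theorem assign_best_spec : Claim_equal_assign_best := by
  intro labels _ _
  unfold Spec_assign_best assign_best assign_best_alt
  cases h1 : (PySem.Dict.get? (PySem.Dict.mk labels) "standard_cot").getD false <;>
    cases h2 : (PySem.Dict.get? (PySem.Dict.mk labels) "self_consistency").getD false <;>
      cases h3 : (PySem.Dict.get? (PySem.Dict.mk labels) "backward_cloze").getD false <;>
        (simp only [PySem.Dict.get?] at h1 h2 h3;
         simp [pySTRATEGIES, pyPRIORITY, h1, h2, h3, PySem.List.min?,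
           PySem.Dict.empty, PySem.Dict.insert, PySem.Dict.get?])
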